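-- pv_equiv track=rewrite | github.com/J-Kiruthika/Nanotopology | nano_topology.py | nanoset
-- ===== SOURCE A (Python) =====
-- def nanoset(a,b,c):
--      final=[]
--      for j in range(len(a)):
--          if(a[j]==b[j]==c[j]):
--                result=a[j]
--          elif(a[j]==b[j]):
--                result=a[j]+c[j]
--          elif(a[j]==c[j]):
--                result=a[j]+b[j]
--          elif(b[j]==c[j]):
--                result=a[j]+b[j]
--          else:
--                result=a[j]+b[j]+c[j]
--          final.append(result)
--      return final
-- ===== SOURCE B (Python) =====
-- def nanoset(a, b, c):
--     final = []
--     for j in range(len(a)):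
--         seen = []
--         for x in (a[j], b[j], c[j]):
--             if x not in seen:
--                 seen.append(x)
--         result = seen[0]
--         for x in seen[1:]:
--             result = result + x
--         final.append(result)
--     return final
-- ===== Notes on version B (the rewrite author's own statement) =====
-- stated objective: alternative
-- what changed: Replaces A's five-way equality branch chain by a uniform rule: per index, keep the order-preserving distinct values of the triple (a[j],b[j],c[j]) and concatenate them.
import Mathlib
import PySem

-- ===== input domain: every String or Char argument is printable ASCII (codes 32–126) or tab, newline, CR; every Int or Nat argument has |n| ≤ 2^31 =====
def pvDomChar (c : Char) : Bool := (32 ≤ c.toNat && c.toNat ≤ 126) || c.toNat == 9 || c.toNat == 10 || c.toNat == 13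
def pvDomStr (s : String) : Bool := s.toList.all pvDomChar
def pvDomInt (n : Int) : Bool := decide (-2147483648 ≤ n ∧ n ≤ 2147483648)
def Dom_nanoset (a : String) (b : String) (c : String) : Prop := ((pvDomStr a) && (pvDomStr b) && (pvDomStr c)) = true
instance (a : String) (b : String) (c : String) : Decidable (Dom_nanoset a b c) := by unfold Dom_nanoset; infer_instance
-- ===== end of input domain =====

-- B replaces A's five-way equality branch chain by one uniform rule (concatenate the
-- order-preserving distinct values of the per-index triple); same O(n) cost, different decomposition.

-- ===== PORT A =====
-- literal port of A: loop j over range(len(a)); the five equality branches in source order.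
-- indexing a[j]/b[j]/c[j] is in range under Pre_; pyGetD's default is never used there.
def nanoset (a : String) (b : String) (c : String) : List String :=
  (PySem.List.pyRange 0 (a.toList.length : Int) 1).foldl
    (fun final j =>
      let x := PySem.List.pyGetD a.toList j ' '
      let y := PySem.List.pyGetD b.toList j ' '
      let z := PySem.List.pyGetD c.toList j ' '
      let result :=
        if x = y ∧ y = z then String.ofList [x]
        else if x = y then String.ofList [x, z]
        else if x = z then String.ofList [x, y]
        else if y = z then String.ofList [x, y]
        else String.ofList [x, y, z]
      final ++ [result]) []

-- ===== PORT B =====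
-- literal port of Source B: per index build the ordered distinct values of the triple
-- ('x not in seen' append loop), then fold concatenation from seen[0] over seen[1:] (List.drop 1).
def nanoset_alt (a : String) (b : String) (c : String) : List String :=
  (PySem.List.pyRange 0 (a.toList.length : Int) 1).foldl
    (fun final j =>
      let seen := [PySem.List.pyGetD a.toList j ' ',
                   PySem.List.pyGetD b.toList j ' ',
                   PySem.List.pyGetD c.toList j ' '].foldl
        (fun s v => if v ∈ s then s else s ++ [v]) []
      let result := (seen.drop 1).foldl (fun r v => r ++ [v])
        [PySem.List.pyGetD seen 0 ' ']
      final ++ [String.ofList result]) []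

-- ===== PRECONDITION & SPEC =====
-- A raises IndexError when b or c is shorter than a (and a is nonempty); excluded here.
def Pre_nanoset (a : String) (b : String) (c : String) : Prop :=
  a.toList.length ≤ b.toList.length ∧ a.toList.length ≤ c.toList.length
instance (a : String) (b : String) (c : String) : Decidable (Pre_nanoset a b c) := by
  unfold Pre_nanoset; infer_instance
def pvWitness_nanoset : String × String × String := ("abc", "abd", "xbc")

def Spec_nanoset (a : String) (b : String) (c : String) (out : List String) : Prop := out = nanoset_alt a b c
instance (a : String) (b : String) (c : String) (out : List String) : Decidable (Spec_nanoset a b c out) := by unfold Spec_nanoset; infer_instance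

-- ===== CLAIM (what is proved, stated in full; the proofs are below) =====
def Claim_equal_nanoset : Prop := ∀ (a : String) (b : String) (c : String), Dom_nanoset a b c → Pre_nanoset a b c → Spec_nanoset a b c (nanoset a b c)

-- ===== LEMMAS AND PROOFS =====

-- per-index agreement: A's five branches equal B's concatenated ordered distinct triple
theorem nanoset_step_eq (x y z : Char) :
    (if x = y ∧ y = z then String.ofList [x]
     else if x = y then String.ofList [x, z]
     else if x = z then String.ofList [x, y]
     else if y = z then String.ofList [x, y]
     else String.ofList [x, y, z]) =
    String.ofList
      ((([x, y, z].foldl (fun s v => if v ∈ s then s else s ++ [v]) []).drop 1).foldl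
        (fun r v => r ++ [v])
        [PySem.List.pyGetD ([x, y, z].foldl (fun s v => if v ∈ s then s else s ++ [v]) []) 0 ' ']) := by
  by_cases hxy : x = y <;> by_cases hyz : y = z <;> by_cases hxz : x = z <;>
    simp_all [List.foldl, PySem.List.pyGetD, eq_comm]

-- ===== VERDICT (by name: the statement is the Claim_ definition above) =====
theorem nanoset_spec : Claim_equal_nanoset := by
  intro a b c _ _
  unfold Spec_nanoset nanoset nanoset_alt
  refine congrFun (congrFun (congrArg _ ?_) _) _
  funext final j
  simp only [nanoset_step_eq]
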